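-- pv_equiv track=rewrite | github.com/ozielcorrea/python-total | day05_functions/challenges.py | devolver_distintos
-- ===== SOURCE A (Python) =====
-- def devolver_distintos(num1, num2, num3):
--     lista_numeros = [num1, num2, num3]
--     lista_numeros.sort()
--     suma = 0
--     for n in lista_numeros:
--         suma += n
--
--     # if the sum of the 3 integers is greather than 15, it gonna return the major number
--     if suma > 15:
--         return lista_numeros[2]
--
--     # if the sum of the 3 integers is minor than 10, it gonna return the minor number
--     elif suma < 10:
--         return lista_numeros[0]
--
--     # if the sum of the 3 integers is between 10 and 15, it gonna return the medium value
--     else: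
--         return lista_numeros[1]
-- ===== SOURCE B (Python) =====
-- def devolver_distintos(num1, num2, num3):
--     suma = num1 + num2 + num3
--     if suma > 15:
--         return max(num1, num2, num3)
--     if suma < 10:
--         return min(num1, num2, num3)
--     return max(min(num1, num2), min(max(num1, num2), num3))
-- ===== Notes on version B (the rewrite author's own statement) =====
-- stated objective: simpler
-- what changed: Drops the list, the sort and the accumulation loop: B branches on num1+num2+num3 and selects the answer with constant comparison trees (max/min of three, and a comparison-based median-of-three).
import Mathlib
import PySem

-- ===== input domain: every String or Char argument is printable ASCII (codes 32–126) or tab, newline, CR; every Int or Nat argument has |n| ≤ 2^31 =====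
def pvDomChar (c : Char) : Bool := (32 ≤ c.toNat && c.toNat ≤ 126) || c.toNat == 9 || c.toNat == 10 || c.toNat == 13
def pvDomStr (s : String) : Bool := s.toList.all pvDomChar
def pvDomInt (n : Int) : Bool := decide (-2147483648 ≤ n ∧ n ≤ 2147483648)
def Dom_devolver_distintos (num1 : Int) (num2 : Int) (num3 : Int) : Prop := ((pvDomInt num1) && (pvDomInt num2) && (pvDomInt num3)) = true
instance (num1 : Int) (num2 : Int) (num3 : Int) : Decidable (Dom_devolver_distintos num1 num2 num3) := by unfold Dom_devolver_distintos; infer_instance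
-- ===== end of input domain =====

-- ===== PORT A =====
-- Header: B drops the list/sort/loop and selects via comparison trees; objective: simpler.
-- lista always has 3 elements, so pyGet? at 0/1/2 always returns some; .getD 0 is never the default
def devolver_distintos (num1 : Int) (num2 : Int) (num3 : Int) : Int :=
  let lista_numeros := PySem.List.sorted [num1, num2, num3] (fun x => x) false
  let suma := lista_numeros.foldl (fun acc n => acc + n) 0
  if suma > 15 then (PySem.List.pyGet? lista_numeros 2).getD 0
  else if suma < 10 then (PySem.List.pyGet? lista_numeros 0).getD 0
  else (PySem.List.pyGet? lista_numeros 1).getD 0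

-- ===== PORT B =====
def devolver_distintos_alt (num1 : Int) (num2 : Int) (num3 : Int) : Int :=
  let suma := num1 + num2 + num3
  if suma > 15 then max num1 (max num2 num3)
  else if suma < 10 then min num1 (min num2 num3)
  else max (min num1 num2) (min (max num1 num2) num3)

-- ===== PRECONDITION & SPEC =====
def Spec_devolver_distintos (num1 : Int) (num2 : Int) (num3 : Int) (out : Int) : Prop := out = devolver_distintos_alt num1 num2 num3
instance (num1 : Int) (num2 : Int) (num3 : Int) (out : Int) : Decidable (Spec_devolver_distintos num1 num2 num3 out) := by unfold Spec_devolver_distintos; infer_instance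

-- ===== CLAIM (what is proved, stated in full; the proofs are below) =====
def Claim_equal_devolver_distintos : Prop := ∀ (num1 : Int) (num2 : Int) (num3 : Int), Dom_devolver_distintos num1 num2 num3 → Spec_devolver_distintos num1 num2 num3 (devolver_distintos num1 num2 num3)

-- ===== LEMMAS AND PROOFS =====
theorem pvInsertBy_nil {α : Type} (f : α → α → Bool) (x : α) :
    PySem.List.insertBy f x [] = [x] := rfl

theorem pvInsertBy_cons {α : Type} (f : α → α → Bool) (x y : α) (ys : List α) :
    PySem.List.insertBy f x (y :: ys) =
      if f x y then x :: y :: ys else y :: PySem.List.insertBy f x ys := rfl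

-- ===== VERDICT (by name: the statement is the Claim_ definition above) =====
set_option maxHeartbeats 2000000 in
theorem devolver_distintos_spec : Claim_equal_devolver_distintos := by
  intro num1 num2 num3 _
  unfold Spec_devolver_distintos devolver_distintos devolver_distintos_alt
  simp only [PySem.List.sorted, List.foldl]
  by_cases h1 : num2 < num1 <;> by_cases h2 : num3 < num2 <;> by_cases h3 : num3 < num1 <;>
    simp [pvInsertBy_nil, pvInsertBy_cons, h1, h2, h3,
      PySem.List.pyGet?, PySem.List.pyIdx?, max_def, min_def] <;>
    split_ifs <;> omega
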